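-- pv_equiv track=rewrite | github.com/Mrteesoft/cryptoTrading-model | src/crypto_signal_ml/chat/flow.py | _build_default_product_map
-- ===== SOURCE A (Python) =====
-- from typing import Any, Protocol, Sequence
--
-- def _build_default_product_map(known_product_ids: Sequence[str]) -> dict[str, str]:
--     """Prefer known USD pairs when mapping base symbols back to products."""
--
--     default_product_by_symbol: dict[str, str] = {}
--     for product_id in known_product_ids:
--         normalized_product_id = str(product_id).strip().upper()
--         if "-" not in normalized_product_id:
--             continue
--         base_currency, quote_currency = normalized_product_id.split("-", 1)
--         existing_product_id = default_product_by_symbol.get(base_currency)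
--         if existing_product_id is None or quote_currency == "USD":
--             default_product_by_symbol[base_currency] = normalized_product_id
--     return default_product_by_symbol
-- ===== SOURCE B (Python) =====
-- def _build_default_product_map(known_product_ids):
--     """Two passes: record the first pair per base, then let the last USD pair override."""
--     default_product_by_symbol = {}
--     for product_id in known_product_ids:
--         normalized_product_id = str(product_id).strip().upper()
--         if "-" not in normalized_product_id:
--             continue
--         base_currency, _quote = normalized_product_id.split("-", 1)
--         default_product_by_symbol.setdefault(base_currency, normalized_product_id)
--     for product_id in known_product_ids:
--         normalized_product_id = str(product_id).strip().upper()
--         if "-" not in normalized_product_id: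
--             continue
--         base_currency, quote_currency = normalized_product_id.split("-", 1)
--         if quote_currency == "USD":
--             default_product_by_symbol[base_currency] = normalized_product_id
--     return default_product_by_symbol
-- ===== Notes on version B (the rewrite author's own statement) =====
-- stated objective: alternative
-- what changed: A builds the map in one pass whose insert condition combines 'base unseen' with 'quote is USD'; B makes two separate passes over the ids: a setdefault pass recording the first pair per base, then an override pass in which the last USD pair wins.
import Mathlib
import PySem

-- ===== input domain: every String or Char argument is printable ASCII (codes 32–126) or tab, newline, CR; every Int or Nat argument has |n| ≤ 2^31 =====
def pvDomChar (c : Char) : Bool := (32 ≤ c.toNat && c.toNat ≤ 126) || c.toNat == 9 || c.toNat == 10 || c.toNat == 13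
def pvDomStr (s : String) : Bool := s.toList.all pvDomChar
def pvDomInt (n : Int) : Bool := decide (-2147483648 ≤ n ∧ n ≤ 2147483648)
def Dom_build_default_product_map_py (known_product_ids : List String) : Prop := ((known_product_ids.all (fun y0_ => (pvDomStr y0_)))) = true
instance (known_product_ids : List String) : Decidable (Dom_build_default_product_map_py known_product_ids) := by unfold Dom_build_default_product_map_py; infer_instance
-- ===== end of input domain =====

-- B builds the map in two separate passes (a first-occurrence setdefault pass, then a last-USD-wins
-- override pass) instead of A's single pass with a combined condition; objective: alternative decomposition.


-- shared normalization: str(product_id).strip().upper()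
def pvNorm (s : String) : String := PySem.Str.upper (PySem.Str.strip s)
-- normalized.split("-", 1) unpacked to (base, quote); the fallback is unreachable since this is
-- used only when "-" is in the string (then split("-", 1) yields exactly two parts)
def pvSplit1 (s : String) : String × String :=
  match PySem.Str.splitMax? s "-" 1 with
  | some [b, q] => (b, q)
  | _ => ("", "")

-- ===== PORT A =====
-- one loop: insert when the base is new or the quote is USD
def build_default_product_map_py (known_product_ids : List String) : List (String × String) :=
  (known_product_ids.foldl (fun d product_id =>
    let n := pvNorm product_id
    if PySem.Str.isIn "-" n = false then d
    else
      let bq := pvSplit1 n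
      let existing := d.get? bq.1
      if existing = none ∨ bq.2 = "USD" then d.insert bq.1 n else d)
    (PySem.Dict.empty : PySem.Dict String String)).items

-- ===== PORT B =====
-- pass 1 (Source B's first loop): record the first pair per base via setdefault
def pvSdStep (d : PySem.Dict String String) (product_id : String) : PySem.Dict String String :=
  let n := pvNorm product_id
  if PySem.Str.isIn "-" n = false then d
  else d.setdefault (pvSplit1 n).1 n

-- pass 2 (Source B's second loop): the last USD pair overrides
def pvUsdStep (d : PySem.Dict String String) (product_id : String) : PySem.Dict String String :=
  let n := pvNorm product_id
  if PySem.Str.isIn "-" n = false then d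
  else if (pvSplit1 n).2 = "USD" then d.insert (pvSplit1 n).1 n else d

def build_default_product_map_py_alt (known_product_ids : List String) : List (String × String) :=
  (known_product_ids.foldl pvUsdStep (known_product_ids.foldl pvSdStep PySem.Dict.empty)).items

-- ===== PRECONDITION & SPEC =====
def Spec_build_default_product_map_py (known_product_ids : List String) (out : List (String × String)) : Prop := out = build_default_product_map_py_alt known_product_ids
instance (known_product_ids : List String) (out : List (String × String)) : Decidable (Spec_build_default_product_map_py known_product_ids out) := by unfold Spec_build_default_product_map_py; infer_instance

-- ===== CLAIM (what is proved, stated in full; the proofs are below) =====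
def Claim_equal_build_default_product_map_py : Prop := ∀ (known_product_ids : List String), Dom_build_default_product_map_py known_product_ids → Spec_build_default_product_map_py known_product_ids (build_default_product_map_py known_product_ids)

-- ===== LEMMAS AND PROOFS =====

-- A's loop body, named for the proofs (identical to the lambda in the port of A)
def pvAStep (d : PySem.Dict String String) (product_id : String) : PySem.Dict String String :=
  let n := pvNorm product_id
  if PySem.Str.isIn "-" n = false then d
  else
    let bq := pvSplit1 n
    let existing := d.get? bq.1
    if existing = none ∨ bq.2 = "USD" then d.insert bq.1 n else d

-- an insert at a key already present in d commutes with an insert at another key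
theorem pv_insert_comm_of_contains (d : PySem.Dict String String) (k b : String) (v n : String)
    (hk : d.contains k = true) (hne : b ≠ k) :
    (d.insert k v).insert b n = (d.insert b n).insert k v := by
  apply PySem.Dict.ext
  have hbk : (b == k) = false := by simp [hne]
  have hkb : (k == b) = false := by simp [Ne.symm hne]
  cases hb : d.contains b with
  | false =>
    simp [PySem.Dict.items_insert, PySem.Dict.contains_insert, hb, hk, hbk, hkb, hne]
  | true =>
    simp only [PySem.Dict.items_insert, PySem.Dict.contains_insert, hb, hk, hbk, hkb,
      Bool.false_or, if_true, List.map_map]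
    apply List.map_congr_left
    intro p _
    by_cases h1 : p.1 = k <;> by_cases h2 : p.1 = b <;>
      simp_all [Function.comp]

-- …and with a setdefault at another key
theorem pv_setdefault_insert_comm (d : PySem.Dict String String) (k b : String) (v n : String)
    (hk : d.contains k = true) (hne : b ≠ k) :
    (d.insert k v).setdefault b n = (d.setdefault b n).insert k v := by
  cases hb : d.contains b with
  | true =>
    rw [PySem.Dict.setdefault_of_contains _ n (by simp [PySem.Dict.contains_insert, hb]),
        PySem.Dict.setdefault_of_contains _ n hb]
  | false =>
    rw [PySem.Dict.setdefault_of_not_contains _ n (by simp [PySem.Dict.contains_insert, hb, hne]),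
        PySem.Dict.setdefault_of_not_contains _ n hb,
        pv_insert_comm_of_contains d k b v n hk hne]

theorem pv_contains_sdStep (d : PySem.Dict String String) (x k : String) (hk : d.contains k = true) :
    (pvSdStep d x).contains k = true := by
  by_cases hin : PySem.Chars.isIn ['-'] (pvNorm x).toList = false
  · simp [pvSdStep, hin, hk]
  · simp [pvSdStep, hin, PySem.Dict.contains_setdefault, hk]

-- pushing an insert at a present key through the whole setdefault pass
theorem pv_sd_fold_insert (ids : List String) (d : PySem.Dict String String) (k v : String)
    (hk : d.contains k = true) :
    ids.foldl pvSdStep (d.insert k v) = (ids.foldl pvSdStep d).insert k v := by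
  induction ids generalizing d with
  | nil => simp only [List.foldl_nil]
  | cons x t ih =>
    simp only [List.foldl_cons]
    have hstep : pvSdStep (d.insert k v) x = (pvSdStep d x).insert k v := by
      by_cases hin : PySem.Chars.isIn ['-'] (pvNorm x).toList = false
      · simp [pvSdStep, hin]
      · simp only [pvSdStep]
        rw [if_neg (by simp [hin]), if_neg (by simp [hin])]
        by_cases hbk : (pvSplit1 (pvNorm x)).1 = k
        · rw [hbk, PySem.Dict.setdefault_of_contains _ (pvNorm x)
                (by simp []),
              PySem.Dict.setdefault_of_contains _ (pvNorm x) hk]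
        · rw [pv_setdefault_insert_comm d k _ v _ hk hbk]
    rw [hstep, ih _ (pv_contains_sdStep d x k hk)]

theorem pv_setdefault_insert_self (d : PySem.Dict String String) (b n : String) :
    (d.setdefault b n).insert b n = d.insert b n := by
  cases hb : d.contains b with
  | true => rw [PySem.Dict.setdefault_of_contains _ n hb]
  | false => rw [PySem.Dict.setdefault_of_not_contains _ n hb, PySem.Dict.insert_insert_self]

-- A's single pass equals B's two passes, from any start dict
theorem pv_main (ids : List String) (d : PySem.Dict String String) :
    ids.foldl pvAStep d = ids.foldl pvUsdStep (ids.foldl pvSdStep d) := by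
  induction ids generalizing d with
  | nil => simp only [List.foldl_nil]
  | cons x t ih =>
    simp only [List.foldl_cons]
    by_cases hin : PySem.Chars.isIn ['-'] (pvNorm x).toList = false
    · have hA : pvAStep d x = d := by simp [pvAStep, hin]
      have hS : pvSdStep d x = d := by simp [pvSdStep, hin]
      have hU : pvUsdStep (t.foldl pvSdStep d) x = t.foldl pvSdStep d := by simp [pvUsdStep, hin]
      rw [hA, hS, hU, ih]
    · by_cases hq : (pvSplit1 (pvNorm x)).2 = "USD"
      · have hA : pvAStep d x = d.insert (pvSplit1 (pvNorm x)).1 (pvNorm x) := by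
          simp [pvAStep, hin, hq]
        have hS : pvSdStep d x = d.setdefault (pvSplit1 (pvNorm x)).1 (pvNorm x) := by
          simp [pvSdStep, hin]
        have hU : pvUsdStep (t.foldl pvSdStep (pvSdStep d x)) x
            = (t.foldl pvSdStep (pvSdStep d x)).insert (pvSplit1 (pvNorm x)).1 (pvNorm x) := by
          simp [pvUsdStep, hin, hq]
        rw [hA, hU, hS, ← pv_sd_fold_insert t _ _ _
              (by simp [PySem.Dict.contains_setdefault]),
            pv_setdefault_insert_self, ih]
      · have hA : pvAStep d x = pvSdStep d x := by
          cases hc : d.contains (pvSplit1 (pvNorm x)).1 with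
          | true =>
            have hg : ¬ d.get? (pvSplit1 (pvNorm x)).1 = none := by
              rw [PySem.Dict.get?_eq_none_iff_contains, hc]; simp
            simp [pvAStep, pvSdStep, hin, hq, hg, PySem.Dict.setdefault_of_contains _ _ hc]
          | false =>
            have hg : d.get? (pvSplit1 (pvNorm x)).1 = none := by
              rw [PySem.Dict.get?_eq_none_iff_contains, hc]
            simp [pvAStep, pvSdStep, hin, hq, hg, PySem.Dict.setdefault_of_not_contains _ _ hc]
        have hU : pvUsdStep (t.foldl pvSdStep (pvSdStep d x)) x = t.foldl pvSdStep (pvSdStep d x) := by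
          simp [pvUsdStep, hin, hq]
        rw [hA, hU, ih]

-- ===== VERDICT (by name: the statement is the Claim_ definition above) =====
theorem build_default_product_map_py_spec : Claim_equal_build_default_product_map_py := by
  intro ids _
  unfold Spec_build_default_product_map_py build_default_product_map_py build_default_product_map_py_alt
  rw [show (fun (d : PySem.Dict String String) product_id =>
    let n := pvNorm product_id
    if PySem.Str.isIn "-" n = false then d
    else
      let bq := pvSplit1 n
      let existing := d.get? bq.1
      if existing = none ∨ bq.2 = "USD" then d.insert bq.1 n else d) = pvAStep from rfl]
  rw [pv_main]
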